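-- pv_equiv track=rewrite | github.com/ostnas/Helper | cases_utils.py | dict_without_key
-- ===== SOURCE A (Python) =====
-- import copy
--
-- def dict_without_key(dict, text):
--     keys = text.split('.')
--     new_dict = copy.deepcopy(dict)
--     next = new_dict
--     if keys[0] in next:
--         for key in keys[:-1]:
--             next = next[key]
--         if keys[-1] in next:
--             del next[keys[-1]]
--         else:
--             return None
--         return new_dict
--     else:
--         return None
-- ===== SOURCE B (Python) =====
-- def dict_without_key(dict, text):
--     # No deepcopy: values are plain strings, so a dotted (multi-part) key can
--     # never traverse into a nested dict -- only a single-part key can be deleted.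
--     keys = text.split('.')
--     if len(keys) == 1 and keys[0] in dict:
--         key = keys[0]
--         return {k: v for k, v in dict.items() if k != key}
--     return None
-- ===== Notes on version B (the rewrite author's own statement) =====
-- stated objective: simpler
-- what changed: B drops the deepcopy and the path-walking loop entirely: on the flat dict[str,str] domain a dotted key can never resolve through string values, so B deletes via one membership test plus a dict comprehension and returns None for every multi-part key.
import Mathlib
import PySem

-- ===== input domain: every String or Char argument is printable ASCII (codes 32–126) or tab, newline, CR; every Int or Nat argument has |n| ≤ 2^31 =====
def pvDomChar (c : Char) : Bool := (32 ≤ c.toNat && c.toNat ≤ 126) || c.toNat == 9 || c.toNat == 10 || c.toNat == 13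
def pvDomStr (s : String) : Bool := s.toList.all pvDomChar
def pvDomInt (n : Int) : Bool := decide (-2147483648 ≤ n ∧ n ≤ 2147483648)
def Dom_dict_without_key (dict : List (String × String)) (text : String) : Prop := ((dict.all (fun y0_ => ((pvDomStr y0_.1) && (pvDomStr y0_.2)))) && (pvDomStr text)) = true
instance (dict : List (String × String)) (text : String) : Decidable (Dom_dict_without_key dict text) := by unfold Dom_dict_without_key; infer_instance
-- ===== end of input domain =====

-- B deletes a single-part key with one membership test and a comprehension, no deepcopy;
-- on this flat dict[str,str] type a dotted key can never resolve, so every multi-part text gives None.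

-- ===== PORT A =====
-- keys = text.split('.')  (split? is none only for an empty separator; '.' is non-empty)
def dwkKeys (text : String) : List String := (PySem.Str.split? text ".").getD []

-- 'next' is dynamically typed in A: it starts as the (deep-copied) dict and, once indexed,
-- becomes a string value; we model it as dict ⊕ string. 'none' marks a raise (excluded by Pre_).
def dwkStep (next : Option ((List (String × String)) ⊕ String)) (key : String) :
    Option ((List (String × String)) ⊕ String) :=
  match next with
  | some (Sum.inl d) => (d.find? (fun p => p.1 == key)).map (fun p => Sum.inr p.2)  -- next = next[key]; none = KeyError
  | _ => none  -- indexing a string (or after a raise) with a string key: TypeError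

def dict_without_key (dict : List (String × String)) (text : String) : Option (List (String × String)) :=
  let keys := dwkKeys text
  match keys with
  | [] => none  -- unreachable: str.split never returns an empty list
  | k0 :: _ =>
    -- new_dict = deepcopy(dict): a value copy; in Lean the value itself
    if dict.any (fun p => p.1 == k0) then          -- keys[0] in next
      let next := keys.dropLast.foldl dwkStep (some (Sum.inl dict))   -- for key in keys[:-1]: next = next[key]
      let last := keys.getLastD ""                 -- keys[-1]
      match next with
      | some (Sum.inl d) =>
          if d.any (fun p => p.1 == last) then
            some (d.eraseP (fun p => p.1 == last)) -- del next[keys[-1]]; return new_dict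
          else none                                -- return None
      | some (Sum.inr _) => none  -- keys[-1] in <string>: present → del raises TypeError (outside Pre_), absent → None
      | none => none              -- a raise occurred (outside Pre_)
    else none                                      -- return None

-- ===== PORT B =====
def dict_without_key_alt (dict : List (String × String)) (text : String) : Option (List (String × String)) :=
  let keys := dwkKeys text
  match keys with
  | [k] =>
      if dict.any (fun p => p.1 == k) then
        some (dict.filter (fun p => !(p.1 == k)))  -- {k: v for k, v in dict.items() if k != key}
      else none
  | _ => none

-- ===== PRECONDITION & SPEC =====
-- Pre_ excludes (a) lists with duplicate keys, which collapse in a real Python dict so the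
-- association list does not determine Python's behaviour, and (b) the inputs on which A raises
-- (dotted text whose first key is present and which then indexes/deletes inside a string value).
def Pre_dict_without_key (dict : List (String × String)) (text : String) : Prop :=
  (dict.map Prod.fst).Nodup ∧
  ¬ (2 ≤ (dwkKeys text).length ∧
     ((dwkKeys text).headD "") ∈ dict.map Prod.fst ∧
     (3 ≤ (dwkKeys text).length ∨
      PySem.Str.isIn ((dwkKeys text).getD 1 "")
        ((dict.reverse.lookup ((dwkKeys text).headD "")).getD "") = true))
instance (dict : List (String × String)) (text : String) : Decidable (Pre_dict_without_key dict text) := by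
  unfold Pre_dict_without_key; infer_instance

def pvWitness_dict_without_key : (List (String × String)) × String := ([("a", "x"), ("b", "y")], "a")

def Spec_dict_without_key (dict : List (String × String)) (text : String) (out : Option (List (String × String))) : Prop := out = dict_without_key_alt dict text
instance (dict : List (String × String)) (text : String) (out : Option (List (String × String))) : Decidable (Spec_dict_without_key dict text out) := by unfold Spec_dict_without_key; infer_instance

-- ===== CLAIM (what is proved, stated in full; the proofs are below) =====
def Claim_equal_dict_without_key : Prop := ∀ (dict : List (String × String)) (text : String), Dom_dict_without_key dict text → Pre_dict_without_key dict text → Spec_dict_without_key dict text (dict_without_key dict text)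


-- ===== LEMMAS AND PROOFS =====

-- on a list with pairwise-distinct keys, deleting the entry of one key = filtering it out
theorem dwk_eraseP_eq_filter (d : List (String × String)) (k : String)
    (h : (d.map Prod.fst).Nodup) :
    d.eraseP (fun p => p.1 == k) = d.filter (fun p => !(p.1 == k)) := by
  induction d with
  | nil => rfl
  | cons a rest ih =>
      simp only [List.map_cons, List.nodup_cons] at h
      by_cases hk : a.1 = k
      · subst hk
        simp only [List.eraseP_cons, List.filter_cons, beq_self_eq_true, Bool.not_true,
          Bool.false_eq_true, cond_true, if_false]
        have : rest.filter (fun p => !(p.1 == a.1)) = rest := by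
          apply List.filter_eq_self.mpr
          intro p hp
          have hne : p.1 ≠ a.1 := fun he => h.1 (he ▸ List.mem_map_of_mem hp)
          simp [hne]
        simp [this]
      · have hb : (a.1 == k) = false := beq_eq_false_iff_ne.mpr hk
        simp only [List.eraseP_cons, List.filter_cons, hb, Bool.not_false, cond_false, if_true]
        rw [ih h.2]

-- once 'next' stopped being a dict it never becomes one again
theorem dwk_foldl_no_inl (tail : List String) (st : Option ((List (String × String)) ⊕ String))
    (h : ∀ d, st ≠ some (Sum.inl d)) :
    ∀ d, tail.foldl dwkStep st ≠ some (Sum.inl d) := by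
  induction tail generalizing st with
  | nil => exact h
  | cons k rest ih =>
      intro d
      simp only [List.foldl_cons]
      apply ih
      intro d'
      match st, h with
      | some (Sum.inl d₀), h => exact absurd rfl (h d₀)
      | some (Sum.inr s), _ => simp [dwkStep]
      | none, _ => simp [dwkStep]

-- ===== VERDICT =====
theorem dict_without_key_spec : Claim_equal_dict_without_key := by
  intro dict text _ hpre
  unfold Spec_dict_without_key dict_without_key dict_without_key_alt
  cases hk : dwkKeys text with
  | nil => rfl
  | cons k0 tl =>
    cases tl with
    | nil =>
        -- single-part key: delete iff present
        by_cases hmem : dict.any (fun p => p.1 == k0)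
        · have e1 : [k0].dropLast = ([] : List String) := rfl
          have e2 : [k0].getLastD "" = k0 := rfl
          simp only [hmem, if_true, e1, e2, List.foldl_nil]
          exact congrArg some (dwk_eraseP_eq_filter dict k0 hpre.1)
        · simp [hmem]
    | cons k1 rest =>
        -- multi-part key: A returns None in every non-raising branch, B returns None
        by_cases hmem : dict.any (fun p => p.1 == k0)
        · simp only [hmem, if_true]
          have hno := dwk_foldl_no_inl ((k0 :: k1 :: rest).dropLast.drop 1)
              (dwkStep (some (Sum.inl dict)) k0)
              (by
                intro d
                simp only [dwkStep]
                cases dict.find? (fun p => p.1 == k0) <;> simp)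
          have hsplit : (k0 :: k1 :: rest).dropLast.foldl dwkStep (some (Sum.inl dict)) =
              ((k0 :: k1 :: rest).dropLast.drop 1).foldl dwkStep (dwkStep (some (Sum.inl dict)) k0) := by
            rw [List.dropLast_cons₂]
            rfl
          rw [hsplit]
          cases hres : ((k0 :: k1 :: rest).dropLast.drop 1).foldl dwkStep (dwkStep (some (Sum.inl dict)) k0) with
          | none => rfl
          | some x =>
              cases x with
              | inl d => exact absurd hres (hno d)
              | inr s => rfl
        · simp [hmem]
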